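-- pv_equiv track=rewrite | github.com/coolcrazyben/MagicML | backend/deck_builder.py | _distribute_basics
-- ===== SOURCE A (Python) =====
-- BASIC_LANDS: dict[str, str] = {
--     "W": "Plains",
--     "U": "Island",
--     "B": "Swamp",
--     "R": "Mountain",
--     "G": "Forest",
-- }
--
-- def _distribute_basics(color_identity: list[str], count: int) -> list[tuple[str, int]]:
--     """Distribute *count* basic land slots proportionally across colors."""
--     colors = [c for c in color_identity if c in BASIC_LANDS]
--     if not colors:
--         return [("Wastes", count)]
--
--     per_color = count // len(colors)
--     remainder = count % len(colors)
--     result: list[tuple[str, int]] = []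
--     for i, color in enumerate(colors):
--         qty = per_color + (1 if i < remainder else 0)
--         if qty > 0:
--             result.append((BASIC_LANDS[color], qty))
--     return result
-- ===== SOURCE B (Python) =====
-- BASIC_LANDS: dict[str, str] = {
--     "W": "Plains",
--     "U": "Island",
--     "B": "Swamp",
--     "R": "Mountain",
--     "G": "Forest",
-- }
--
-- def _distribute_basics(color_identity: list[str], count: int) -> list[tuple[str, int]]:
--     """Distribute *count* basic land slots across colors, handing out the
--     ceiling of the remaining average at each step (bigger shares first)."""
--     colors = [c for c in color_identity if c in BASIC_LANDS]
--     if not colors: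
--         return [("Wastes", count)]
--
--     result: list[tuple[str, int]] = []
--     remaining = count
--     remaining_colors = len(colors)
--     for color in colors:
--         qty = -(-remaining // remaining_colors)  # integer ceiling
--         if qty > 0:
--             result.append((BASIC_LANDS[color], qty))
--         remaining -= qty
--         remaining_colors -= 1
--     return result
-- ===== Notes on version B (the rewrite author's own statement) =====
-- stated objective: alternative
-- what changed: B drops the precomputed per_color/remainder split and instead makes one pass keeping a running remaining count and remaining color number, giving each color the integer ceiling of the remaining average.
import Mathlib
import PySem

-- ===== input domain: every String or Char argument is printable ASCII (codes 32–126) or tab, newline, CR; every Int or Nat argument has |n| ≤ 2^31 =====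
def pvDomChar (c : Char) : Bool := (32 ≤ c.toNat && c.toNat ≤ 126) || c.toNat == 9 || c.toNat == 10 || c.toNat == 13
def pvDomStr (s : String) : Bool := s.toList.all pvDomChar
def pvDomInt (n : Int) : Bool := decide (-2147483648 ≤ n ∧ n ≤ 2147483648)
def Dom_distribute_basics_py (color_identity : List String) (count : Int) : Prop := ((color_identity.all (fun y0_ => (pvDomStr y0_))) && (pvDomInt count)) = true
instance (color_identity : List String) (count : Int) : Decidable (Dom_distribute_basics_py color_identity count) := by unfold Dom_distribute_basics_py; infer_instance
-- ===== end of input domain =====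

-- B replaces A's precomputed per_color/remainder split by a single pass that keeps a running
-- remaining count / remaining color number and hands out the ceiling of the remaining average
-- (objective: alternative decomposition, same cost).

-- ===== PORT A =====
def pvBASIC_LANDS : PySem.Dict String String :=
  PySem.Dict.ofList [("W", "Plains"), ("U", "Island"), ("B", "Swamp"), ("R", "Mountain"), ("G", "Forest")]

def distribute_basics_py (color_identity : List String) (count : Int) : List (String × Int) :=
  let colors := color_identity.filter (fun c => pvBASIC_LANDS.contains c)
  if colors = [] then [("Wastes", count)]
  else
    let per_color := PySem.Int.floordiv count (colors.length : Int)
    let remainder := PySem.Int.mod count (colors.length : Int)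
    (PySem.List.enumerate colors).foldl (fun result p =>
      let qty := per_color + (if p.1 < remainder then 1 else 0)
      if qty > 0 then result ++ [((pvBASIC_LANDS.get? p.2).getD "", qty)] else result) []

-- ===== PORT B =====
def pvAltLoop (colors : List String) (remaining rc : Int) : List (String × Int) :=
  match colors with
  | [] => []
  | c :: t =>
    let qty := -(PySem.Int.floordiv (-remaining) rc)   -- -(-remaining // remaining_colors), integer ceiling
    (if qty > 0 then [((pvBASIC_LANDS.get? c).getD "", qty)] else []) ++
      pvAltLoop t (remaining - qty) (rc - 1)

def distribute_basics_py_alt (color_identity : List String) (count : Int) : List (String × Int) :=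
  let colors := color_identity.filter (fun c => pvBASIC_LANDS.contains c)
  if colors = [] then [("Wastes", count)]
  else pvAltLoop colors count (colors.length : Int)

-- ===== PRECONDITION & SPEC =====
def Spec_distribute_basics_py (color_identity : List String) (count : Int) (out : List (String × Int)) : Prop := out = distribute_basics_py_alt color_identity count
instance (color_identity : List String) (count : Int) (out : List (String × Int)) : Decidable (Spec_distribute_basics_py color_identity count out) := by unfold Spec_distribute_basics_py; infer_instance

-- ===== CLAIM (what is proved, stated in full; the proofs are below) =====
def Claim_equal_distribute_basics_py : Prop := ∀ (color_identity : List String) (count : Int), Dom_distribute_basics_py color_identity count → Spec_distribute_basics_py color_identity count (distribute_basics_py color_identity count)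

-- ===== LEMMAS AND PROOFS =====

/-- Common shape of both per-color loops: color `i` (head has `0 < r` iff `i < remainder`)
gets `q` plus one while `r` is still positive. -/
def pvAmap (cs : List String) (q r : Int) : List (String × Int) :=
  match cs with
  | [] => []
  | c :: t =>
    let qty := q + (if 0 < r then 1 else 0)
    (if qty > 0 then [((pvBASIC_LANDS.get? c).getD "", qty)] else []) ++ pvAmap t q (r - 1)

lemma pvAmap_nonpos (cs : List String) (q : Int) :
    ∀ r r' : Int, r ≤ 0 → r' ≤ 0 → pvAmap cs q r = pvAmap cs q r' := by
  induction cs with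
  | nil => intro r r' _ _; rfl
  | cons c t ih =>
    intro r r' hr hr'
    simp only [pvAmap]
    rw [if_neg (by omega : ¬ 0 < r), if_neg (by omega : ¬ 0 < r'), ih (r - 1) (r' - 1) (by omega) (by omega)]

lemma pvA_loop_eq (q r : Int) :
    ∀ (cs : List String) (k : Int) (acc : List (String × Int)),
    (PySem.List.enumerate cs k).foldl (fun result p =>
      let qty := q + (if p.1 < r then 1 else 0)
      if qty > 0 then result ++ [((pvBASIC_LANDS.get? p.2).getD "", qty)] else result) acc
      = acc ++ pvAmap cs q (r - k) := by
  intro cs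
  induction cs with
  | nil => intro k acc; simp [PySem.List.enumerate_nil, pvAmap]
  | cons c t ih =>
    intro k acc
    rw [PySem.List.enumerate_cons, List.foldl_cons, ih (k + 1)]
    simp only [pvAmap]
    have hk : r - k - 1 = r - (k + 1) := by ring
    rw [hk]
    by_cases h : k < r
    · rw [if_pos (show ((k, c).1 < r) from h), if_pos (by omega : (0:Int) < r - k)]
      split <;> simp
    · rw [if_neg (show ¬ ((k, c).1 < r) from h), if_neg (by omega : ¬ (0:Int) < r - k)]
      split <;> simp

lemma pvCeil_step (n q r : Int) (hn : 0 < n) (h0 : 0 ≤ r) (hr : r < n) :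
    -(PySem.Int.floordiv (-(q * n + r)) n) = q + (if 0 < r then 1 else 0) := by
  rw [PySem.Int.neg_floordiv_neg_eq_iff_of_pos hn]
  split_ifs with h <;> constructor <;> nlinarith

lemma pvB_loop_eq :
    ∀ (cs : List String) (q r : Int), 0 ≤ r → (r = 0 ∨ r < (cs.length : Int)) →
    pvAltLoop cs (q * (cs.length : Int) + r) (cs.length : Int) = pvAmap cs q r := by
  intro cs
  induction cs with
  | nil => intro q r _ _; rfl
  | cons c t ih =>
    intro q r h0 hr
    have hn : (0 : Int) < ((c :: t).length : Int) := by simp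
    have hrn : r < ((c :: t).length : Int) := by
      rcases hr with h | h
      · omega
      · exact h
    simp only [pvAltLoop, pvAmap]
    rw [pvCeil_step ((c :: t).length : Int) q r hn h0 hrn]
    by_cases hpos : 0 < r
    · have h1 : q * ((c :: t).length : Int) + r - (q + (if 0 < r then 1 else 0))
          = q * (t.length : Int) + (r - 1) := by
        rw [if_pos hpos]; simp; ring
      have h2 : ((c :: t).length : Int) - 1 = (t.length : Int) := by simp
      rw [h1, h2, ih q (r - 1) (by omega) (by right; simp at hrn ⊢; omega)]
    · have hr0 : r = 0 := by omega
      have h1 : q * ((c :: t).length : Int) + r - (q + (if 0 < r then 1 else 0))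
          = q * (t.length : Int) + 0 := by
        rw [if_neg hpos, hr0]; simp; ring
      have h2 : ((c :: t).length : Int) - 1 = (t.length : Int) := by simp
      rw [h1, h2, ih q 0 (by omega) (by left; rfl),
        pvAmap_nonpos t q 0 (r - 1) (by omega) (by omega)]

-- ===== VERDICT (by name: the statement is the Claim_ definition above) =====
theorem distribute_basics_py_spec : Claim_equal_distribute_basics_py := by
  intro color_identity count _
  unfold Spec_distribute_basics_py distribute_basics_py distribute_basics_py_alt
  set colors := color_identity.filter (fun c => pvBASIC_LANDS.contains c) with hco
  by_cases hnil : colors = []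
  · simp [hnil]
  · simp only [if_neg hnil]
    have hn : (0 : Int) < (colors.length : Int) := by
      have : colors ≠ [] := hnil
      have : 0 < colors.length := List.length_pos_iff.mpr this
      exact_mod_cast this
    set q := PySem.Int.floordiv count (colors.length : Int) with hq
    set r := PySem.Int.mod count (colors.length : Int) with hrdef
    have hsum : q * (colors.length : Int) + r = count := PySem.Int.floordiv_mul_add_mod count (colors.length : Int)
    have hmod : r = count % (colors.length : Int) := by
      rw [hrdef, PySem.Int.mod_eq_emod_of_pos hn]
    have h0 : 0 ≤ r := by rw [hmod]; exact Int.emod_nonneg count (by omega)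
    have hrn : r < (colors.length : Int) := by rw [hmod]; exact Int.emod_lt_of_pos count hn
    rw [pvA_loop_eq q r colors 0 [], List.nil_append, sub_zero]
    rw [← hsum] at *
    rw [pvB_loop_eq colors q r h0 (Or.inr hrn)]
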